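-- pv_equiv track=rewrite | github.com/Vergil0327/leetcode-history | 2-D Dynamic Programming/3811. Number of Alternating XOR Partitions/solution.py | alternatingXOR
-- ===== SOURCE A (Python) =====
-- from typing import List
--
-- from collections import defaultdict
--
-- def alternatingXOR(nums: List[int], target1: int, target2: int) -> int:
--     mod = 10**9 + 7
--     n = len(nums)
--
--     # dp1[i] = ways to partition nums[:i] ending with target1 block
--     # dp2[i] = ways to partition nums[:i] ending with target2 block
--
--     # We use counters to store: How many dp states exist for a specific prefix XOR value?
--     # To calculate dp1, we need previous dp2 states where (curr_pref ^ prev_pref) == target1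
--     # To calculate dp2, we need previous dp1 states where (curr_pref ^ prev_pref) == target2
--
--     count_for_target1 = defaultdict(int) # Stores dp2 sums for XOR lookup
--     count_for_target2 = defaultdict(int) # Stores dp1 sums for XOR lookup
--
--     # Base case: To start the very first block (target1),
--     # it's as if we have one "dp2" state at index 0 with prefix XOR 0.
--     count_for_target1[0] = 1
--
--     curr_pref = 0
--     res = 0
--
--     for i in range(n):
--         curr_pref ^= nums[i]
--
--         # 1. Try to end a target1 block here
--         # Need: curr_pref ^ prev_pref == target1  => prev_pref = curr_pref ^ target1
--         ways1 = count_for_target1[curr_pref ^ target1] % mod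
--
--         # 2. Try to end a target2 block here
--         # Need: curr_pref ^ prev_pref == target2  => prev_pref = curr_pref ^ target2
--         ways2 = count_for_target2[curr_pref ^ target2] % mod
--
--         # Update counters for the next step
--         # A block ending in target1 allows the NEXT block to be target2
--         count_for_target2[curr_pref] = (count_for_target2[curr_pref] + ways1) % mod
--         # A block ending in target2 allows the NEXT block to be target1
--         count_for_target1[curr_pref] = (count_for_target1[curr_pref] + ways2) % mod
--
--         # The answer is the number of ways to end at the very last element.
--         # However, the problem says "ending with target1, then target2, ...".
--         # This means if the total blocks are odd, it ends in target1.
--         # If even, it ends in target2.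
--         if i == n - 1:
--             res = (ways1 + ways2) % mod
--
--     return res
-- ===== SOURCE B (Python) =====
-- from typing import List
--
-- def alternatingXOR(nums: List[int], target1: int, target2: int) -> int:
--     mod = 10**9 + 7
--     if not nums:
--         return 0
--     # prefix XORs: P[i] = nums[0] ^ ... ^ nums[i-1]
--     P = [0]
--     for x in nums:
--         P.append(P[-1] ^ x)
--     # dp1[i] = partitions of nums[:i] whose last block xors to target1
--     # dp2[i] = same for target2; dp2[0] = 1 is the virtual start state
--     dp1 = [0]
--     dp2 = [1]
--     for Pi in P[1:]:
--         need1 = Pi ^ target1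
--         need2 = Pi ^ target2
--         s1 = 0
--         s2 = 0
--         for Pj, d1, d2 in zip(P, dp1, dp2):
--             if Pj == need1:
--                 s1 += d2
--             if Pj == need2:
--                 s2 += d1
--         dp1.append(s1 % mod)
--         dp2.append(s2 % mod)
--     return (dp1[-1] + dp2[-1]) % mod
-- ===== Notes on version B (the rewrite author's own statement) =====
-- stated objective: alternative
-- what changed: Replaces the single-pass hash-map (defaultdict keyed by prefix XOR) accumulation with an explicit prefix-XOR array and a two-row DP over positions whose inner scan over earlier prefixes finds the matching predecessors.
import Mathlib
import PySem

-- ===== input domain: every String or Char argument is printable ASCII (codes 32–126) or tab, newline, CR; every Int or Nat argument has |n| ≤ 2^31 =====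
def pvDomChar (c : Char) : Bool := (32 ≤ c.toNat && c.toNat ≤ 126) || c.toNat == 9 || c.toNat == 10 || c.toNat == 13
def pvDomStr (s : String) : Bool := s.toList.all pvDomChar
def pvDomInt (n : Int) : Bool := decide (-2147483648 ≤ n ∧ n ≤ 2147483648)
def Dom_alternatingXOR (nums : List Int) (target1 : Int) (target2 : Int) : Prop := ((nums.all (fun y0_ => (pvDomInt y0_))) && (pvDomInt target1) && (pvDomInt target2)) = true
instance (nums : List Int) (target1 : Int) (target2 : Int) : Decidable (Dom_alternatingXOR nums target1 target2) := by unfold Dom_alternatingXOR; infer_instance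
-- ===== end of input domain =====

-- B replaces A's single-pass defaultdict accumulation keyed by prefix XOR with an explicit
-- prefix-XOR array and a two-row DP whose inner scan over earlier prefixes finds matching
-- predecessor states (objective: alternative decomposition, not faster).

-- ===== PORT A =====
def alternatingXOR (nums : List Int) (target1 : Int) (target2 : Int) : Int :=
  let md : Int := 10 ^ 9 + 7
  let n : Int := (nums.length : Int)
  let st :=
    (PySem.List.enumerate nums).foldl
      (fun (st : PySem.Dict Int Int × PySem.Dict Int Int × Int × Int) ix =>
        let pref := PySem.Int.bxor st.2.2.1 ix.2
        let ways1 := PySem.Int.mod (st.1.getD (PySem.Int.bxor pref target1) 0) md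
        let ways2 := PySem.Int.mod ((st.2.1).getD (PySem.Int.bxor pref target2) 0) md
        let c2' := (st.2.1).insert pref (PySem.Int.mod ((st.2.1).getD pref 0 + ways1) md)
        let c1' := st.1.insert pref (PySem.Int.mod (st.1.getD pref 0 + ways2) md)
        let res := if ix.1 = n - 1 then PySem.Int.mod (ways1 + ways2) md else st.2.2.2
        (c1', c2', pref, res))
      (PySem.Dict.empty.insert 0 1, PySem.Dict.empty, 0, 0)
  st.2.2.2

-- ===== PORT B =====
def alternatingXOR_alt (nums : List Int) (target1 : Int) (target2 : Int) : Int :=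
  let md : Int := 10 ^ 9 + 7
  if nums = [] then 0
  else
    let P := nums.foldl
      (fun P x => P ++ [PySem.Int.bxor (PySem.List.pyGetD P (-1) 0) x]) [(0 : Int)]
    let st :=
      (PySem.List.slice P (some 1) none).foldl
        (fun (dp : List Int × List Int) Pi =>
          let need1 := PySem.Int.bxor Pi target1
          let need2 := PySem.Int.bxor Pi target2
          let s :=
            (P.zip (dp.1.zip dp.2)).foldl
              (fun (s : Int × Int) e =>
                (if e.1 = need1 then s.1 + e.2.2 else s.1,
                 if e.1 = need2 then s.2 + e.2.1 else s.2))
              ((0 : Int), (0 : Int))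
          (dp.1 ++ [PySem.Int.mod s.1 md], dp.2 ++ [PySem.Int.mod s.2 md]))
        ([(0 : Int)], [(1 : Int)])
    PySem.Int.mod (PySem.List.pyGetD st.1 (-1) 0 + PySem.List.pyGetD st.2 (-1) 0) md

-- ===== PRECONDITION & SPEC =====
def Spec_alternatingXOR (nums : List Int) (target1 : Int) (target2 : Int) (out : Int) : Prop := out = alternatingXOR_alt nums target1 target2
instance (nums : List Int) (target1 : Int) (target2 : Int) (out : Int) : Decidable (Spec_alternatingXOR nums target1 target2 out) := by unfold Spec_alternatingXOR; infer_instance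

-- ===== CLAIM (what is proved, stated in full; the proofs are below) =====
def Claim_equal_alternatingXOR : Prop := ∀ (nums : List Int) (target1 : Int) (target2 : Int), Dom_alternatingXOR nums target1 target2 → Spec_alternatingXOR nums target1 target2 (alternatingXOR nums target1 target2)

-- ===== LEMMAS AND PROOFS =====

-- the list of prefix XORs starting from p
def pvPfx (p : Int) : List Int → List Int
  | [] => [p]
  | x :: xs => p :: pvPfx (PySem.Int.bxor p x) xs

-- sum of second components whose first component matches q
def pvMsum (q : Int) (l : List (Int × Int)) : Int :=
  l.foldl (fun a e => if e.1 = q then a + e.2 else a) 0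

-- A's loop body, named (defeq to the lambda in alternatingXOR)
def pvStepA (N target1 target2 : Int)
    (st : PySem.Dict Int Int × PySem.Dict Int Int × Int × Int) (ix : Int × Int) :
    PySem.Dict Int Int × PySem.Dict Int Int × Int × Int :=
  let pref := PySem.Int.bxor st.2.2.1 ix.2
  let ways1 := PySem.Int.mod (st.1.getD (PySem.Int.bxor pref target1) 0) (10 ^ 9 + 7)
  let ways2 := PySem.Int.mod ((st.2.1).getD (PySem.Int.bxor pref target2) 0) (10 ^ 9 + 7)
  let c2' := (st.2.1).insert pref (PySem.Int.mod ((st.2.1).getD pref 0 + ways1) (10 ^ 9 + 7))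
  let c1' := st.1.insert pref (PySem.Int.mod (st.1.getD pref 0 + ways2) (10 ^ 9 + 7))
  let res := if ix.1 = N - 1 then PySem.Int.mod (ways1 + ways2) (10 ^ 9 + 7) else st.2.2.2
  (c1', c2', pref, res)

-- B's loop body, named (defeq to the lambda in alternatingXOR_alt)
def pvStepB (P : List Int) (target1 target2 : Int)
    (dp : List Int × List Int) (Pi : Int) : List Int × List Int :=
  let need1 := PySem.Int.bxor Pi target1
  let need2 := PySem.Int.bxor Pi target2
  let s :=
    (P.zip (dp.1.zip dp.2)).foldl
      (fun (s : Int × Int) e =>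
        (if e.1 = need1 then s.1 + e.2.2 else s.1,
         if e.1 = need2 then s.2 + e.2.1 else s.2))
      ((0 : Int), (0 : Int))
  (dp.1 ++ [PySem.Int.mod s.1 (10 ^ 9 + 7)], dp.2 ++ [PySem.Int.mod s.2 (10 ^ 9 + 7)])

lemma pvA_eq (nums : List Int) (t1 t2 : Int) :
    alternatingXOR nums t1 t2 =
      ((PySem.List.enumerate nums).foldl (pvStepA (nums.length : Int) t1 t2)
        (PySem.Dict.empty.insert 0 1, PySem.Dict.empty, 0, 0)).2.2.2 := rfl

lemma pvP_foldl (xs : List Int) : ∀ (ys : List Int) (p : Int),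
    xs.foldl (fun P x => P ++ [PySem.Int.bxor (PySem.List.pyGetD P (-1) 0) x]) (ys ++ [p])
      = ys ++ pvPfx p xs := by
  induction xs with
  | nil => intro ys p; simp [pvPfx]
  | cons x xs ih =>
      intro ys p
      simp only [List.foldl_cons, PySem.List.pyGetD_neg_one_append_singleton, pvPfx]
      have : ys ++ [p] ++ [PySem.Int.bxor p x] = (ys ++ [p]) ++ [PySem.Int.bxor p x] := rfl
      rw [this, ih (ys ++ [p]) (PySem.Int.bxor p x)]
      simp

lemma pvB_eq (nums : List Int) (t1 t2 : Int) (h : nums ≠ []) :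
    alternatingXOR_alt nums t1 t2 =
      (fun st => PySem.Int.mod (PySem.List.pyGetD st.1 (-1) 0 + PySem.List.pyGetD st.2 (-1) 0) (10 ^ 9 + 7))
        (((pvPfx 0 nums).tail).foldl (pvStepB (pvPfx 0 nums) t1 t2) ([(0:Int)], [(1:Int)])) := by
  unfold alternatingXOR_alt
  rw [if_neg h]
  have hP : nums.foldl
      (fun P x => P ++ [PySem.Int.bxor (PySem.List.pyGetD P (-1) 0) x]) [(0 : Int)]
      = pvPfx 0 nums := by
    have := pvP_foldl nums [] 0
    simpa using this
  simp only [hP, PySem.List.slice_from_one]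
  rfl

lemma pvMod_mod (a : Int) :
    PySem.Int.mod (PySem.Int.mod a (10 ^ 9 + 7)) (10 ^ 9 + 7) = PySem.Int.mod a (10 ^ 9 + 7) := by
  rw [PySem.Int.mod_eq_emod_of_pos (by norm_num), PySem.Int.mod_eq_emod_of_pos (by norm_num)]
  exact Int.emod_emod_of_dvd a dvd_rfl

lemma pvMod_add_left (a b : Int) :
    PySem.Int.mod (PySem.Int.mod a (10 ^ 9 + 7) + b) (10 ^ 9 + 7) = PySem.Int.mod (a + b) (10 ^ 9 + 7) := by
  rw [PySem.Int.mod_eq_emod_of_pos (by norm_num), PySem.Int.mod_eq_emod_of_pos (by norm_num),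
    PySem.Int.mod_eq_emod_of_pos (a := a + b) (by norm_num)]
  exact Int.emod_add_emod a _ b

lemma pvMsum_foldl (q : Int) (l : List (Int × Int)) : ∀ (a : Int),
    l.foldl (fun a e => if e.1 = q then a + e.2 else a) a = a + pvMsum q l := by
  induction l with
  | nil => intro a; simp [pvMsum]
  | cons e l ih =>
      intro a
      simp only [pvMsum, List.foldl_cons] at *
      by_cases h : e.1 = q
      · simp only [h, if_true]
        rw [ih, ih (0 + e.2)]
        try ring
      · simp only [h, if_false]
        try rw [ih, ih 0]
        try ring

lemma pvMsum_append_singleton (q a b : Int) (l : List (Int × Int)) :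
    pvMsum q (l ++ [(a, b)]) = pvMsum q l + (if a = q then b else 0) := by
  unfold pvMsum
  rw [List.foldl_append]
  simp only [List.foldl_cons, List.foldl_nil]
  rw [pvMsum_foldl q l]
  by_cases h : a = q <;> simp [h, pvMsum]

lemma pvMsum_cons (q x y : Int) (l : List (Int × Int)) :
    pvMsum q ((x, y) :: l) = (if x = q then y else 0) + pvMsum q l := by
  simp only [pvMsum, List.foldl_cons]
  rw [pvMsum_foldl]
  by_cases hx : x = q <;> simp [hx, pvMsum]

lemma pvZip_trunc {α β : Type} (l1 l2 : List α) (l3 : List β) (h : l3.length ≤ l1.length) :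
    (l1 ++ l2).zip l3 = l1.zip l3 := by
  induction l1 generalizing l3 with
  | nil => cases l3 with
    | nil => simp
    | cons c cs => simp at h
  | cons a as ih => cases l3 with
    | nil => simp
    | cons c cs => simp_all [List.zip]

lemma pvInner (q1 q2 : Int) : ∀ (Ps d1 d2 : List Int) (a b : Int), d1.length = d2.length →
    (Ps.zip (d1.zip d2)).foldl
        (fun s e => (if e.1 = q1 then s.1 + e.2.2 else s.1, if e.1 = q2 then s.2 + e.2.1 else s.2))
        (a, b)
      = (a + pvMsum q1 (Ps.zip d2), b + pvMsum q2 (Ps.zip d1)) := by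
  intro Ps
  induction Ps with
  | nil => intro d1 d2 a b h; simp [pvMsum]
  | cons x Ps ih =>
      intro d1 d2 a b h
      cases d1 with
      | nil =>
          cases d2 with
          | nil => simp [pvMsum]
          | cons v vs => simp at h
      | cons u us =>
          cases d2 with
          | nil => simp at h
          | cons v vs =>
              simp only [List.zip_cons_cons, List.foldl_cons]
              rw [ih us vs _ _ (by simpa using h)]
              rw [pvMsum_cons, pvMsum_cons]
              simp only [Prod.mk.injEq]
              constructor
              · by_cases hx : x = q1 <;> first | (simp [hx]; ring) | simp [hx]
              · by_cases hx : x = q2 <;> first | (simp [hx]; ring) | simp [hx]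

lemma pvPfx_eq_cons (p : Int) (l : List Int) : pvPfx p l = p :: (pvPfx p l).tail := by
  cases l <;> rfl

lemma pvMain (t1 t2 : Int) (rest : List Int) : ∀ (s N p : Int)
    (c1 c2 : PySem.Dict Int Int) (r : Int) (P Pd dp1 dp2 : List Int),
    rest ≠ [] →
    s + (rest.length : Int) = N →
    P = Pd ++ (pvPfx p rest).tail →
    dp1.length = Pd.length → dp2.length = Pd.length →
    (∀ q, c1.getD q 0 = PySem.Int.mod (pvMsum q (Pd.zip dp2)) (10 ^ 9 + 7)) →
    (∀ q, c2.getD q 0 = PySem.Int.mod (pvMsum q (Pd.zip dp1)) (10 ^ 9 + 7)) →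
    ((PySem.List.enumerate rest s).foldl (pvStepA N t1 t2) (c1, c2, p, r)).2.2.2
      = PySem.Int.mod
          (PySem.List.pyGetD (((pvPfx p rest).tail).foldl (pvStepB P t1 t2) (dp1, dp2)).1 (-1) 0
           + PySem.List.pyGetD (((pvPfx p rest).tail).foldl (pvStepB P t1 t2) (dp1, dp2)).2 (-1) 0)
          (10 ^ 9 + 7) := by
  induction rest with
  | nil => intro s N p c1 c2 r P Pd dp1 dp2 hne; exact absurd rfl hne
  | cons x rest' ih =>
      intro s N p c1 c2 r P Pd dp1 dp2 _hne hN hP h1 h2 hc1 hc2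
      have htail : (pvPfx p (x :: rest')).tail = pvPfx (PySem.Int.bxor p x) rest' := rfl
      set p' := PySem.Int.bxor p x with hp'
      set w1 := PySem.Int.mod (pvMsum (PySem.Int.bxor p' t1) (Pd.zip dp2)) (10 ^ 9 + 7) with hw1
      set w2 := PySem.Int.mod (pvMsum (PySem.Int.bxor p' t2) (Pd.zip dp1)) (10 ^ 9 + 7) with hw2
      have hzip : P.zip (dp1.zip dp2) = Pd.zip (dp1.zip dp2) := by
        rw [hP]
        exact pvZip_trunc _ _ _ (by simp [h1, h2])
      have hsB : pvStepB P t1 t2 (dp1, dp2) p' = (dp1 ++ [w1], dp2 ++ [w2]) := by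
        simp only [pvStepB]
        rw [hzip, pvInner (PySem.Int.bxor p' t1) (PySem.Int.bxor p' t2) Pd dp1 dp2 0 0
          (h1.trans h2.symm)]
        simp only [zero_add]
        rfl
      have hsA : pvStepA N t1 t2 (c1, c2, p, r) (s, x)
          = (c1.insert p' (PySem.Int.mod (pvMsum p' (Pd.zip dp2) + w2) (10 ^ 9 + 7)),
             c2.insert p' (PySem.Int.mod (pvMsum p' (Pd.zip dp1) + w1) (10 ^ 9 + 7)),
             p',
             if s = N - 1 then PySem.Int.mod (w1 + w2) (10 ^ 9 + 7) else r) := by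
        simp only [pvStepA]
        rw [hc1 (PySem.Int.bxor p' t1), hc2 (PySem.Int.bxor p' t2),
          hc1 p', hc2 p', pvMod_mod, pvMod_mod, pvMod_add_left, pvMod_add_left]
      rw [htail, pvPfx_eq_cons p' rest']
      simp only [PySem.List.enumerate_cons, List.foldl_cons, hsA, hsB]
      cases rest' with
      | nil =>
          have hs : s = N - 1 := by simp at hN; omega
          simp only [pvPfx, List.tail_cons, List.foldl_nil, if_pos hs,
            PySem.List.pyGetD_neg_one_append_singleton, PySem.List.enumerate_nil]
      | cons y rest'' =>
          apply ih (s + 1) N p' _ _ _ P (Pd ++ [p']) (dp1 ++ [w1]) (dp2 ++ [w2])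
          · simp
          · simp only [List.length_cons] at hN ⊢; push_cast at hN ⊢; omega
          · rw [hP, htail, pvPfx_eq_cons p' (y :: rest'')]
            simp
          · simp [h1]
          · simp [h2]
          · intro q
            rw [PySem.Dict.getD_insert]
            rw [List.zip_append (by omega), show [p'].zip [w2] = [(p', w2)] from rfl,
              pvMsum_append_singleton]
            by_cases hq : q = p'
            · subst hq
              simp
            · rw [if_neg hq, if_neg (fun h => hq h.symm), add_zero, hc1 q]
          · intro q
            rw [PySem.Dict.getD_insert]
            rw [List.zip_append (by omega), show [p'].zip [w1] = [(p', w1)] from rfl,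
              pvMsum_append_singleton]
            by_cases hq : q = p'
            · subst hq
              simp
            · rw [if_neg hq, if_neg (fun h => hq h.symm), add_zero, hc2 q]

-- ===== VERDICT (by name: the statement is the Claim_ definition above) =====
theorem alternatingXOR_spec : Claim_equal_alternatingXOR := by
  intro nums t1 t2 _h
  unfold Spec_alternatingXOR
  cases nums with
  | nil => rfl
  | cons x xs =>
      rw [pvA_eq, pvB_eq _ _ _ (by simp)]
      refine pvMain t1 t2 (x :: xs) 0 (((x :: xs).length : Nat) : Int) 0 _ _ 0
        (pvPfx 0 (x :: xs)) [0] [0] [1] (by simp) (by simp) ?_ rfl rfl ?_ ?_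
      · rw [pvPfx_eq_cons 0 (x :: xs)]
        rfl
      · intro q
        rw [PySem.Dict.getD_insert,
          show ([(0:Int)].zip [(1:Int)]) = [((0:Int),(1:Int))] from rfl, pvMsum_cons]
        by_cases hq : q = 0
        · subst hq
          simp [pvMsum]
        · rw [if_neg hq, if_neg (fun h => hq h.symm)]
          simp [pvMsum, PySem.Dict.getD_empty]
      · intro q
        rw [show ([(0:Int)].zip [(0:Int)]) = [((0:Int),(0:Int))] from rfl, pvMsum_cons]
        simp [pvMsum, PySem.Dict.getD_empty]
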